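-- pv_equiv track=rewrite | github.com/divastor/gen_auth_usernames | gen3_auth_usernames.py | chopAndAdd
-- ===== SOURCE A (Python) =====
-- def chopAndAdd(chop, max_of_chop, add1="", add2=""):
--     chopped = chop[0:max_of_chop]
--     result = chopped
--     mylist = [result + add1 + add2]
--     if add1 != "":
--         mylist.append(add1 + add2 + result)
--     if add2 != "":
--         mylist.append(result + add2 + add1)
--         mylist.append(add2 + add1 + result)
--     for c in chop[max_of_chop:]:
--         result += c
--         mylist.append(result + add1 + add2)
--         if add1 != "":
--             mylist.append(add1 + add2 + result)
--         if add2 != "":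
--             mylist.append(result + add2 + add1)
--             mylist.append(add2 + add1 + result)
--     return mylist
-- ===== SOURCE B (Python) =====
-- def chopAndAdd(chop, max_of_chop, add1="", add2=""):
--     # column-wise generation: prefixes by independent slicing (no accumulator),
--     # one full pass per affix arrangement, then interleave the columns with zip
--     start = len(chop[:max_of_chop])
--     prefixes = [chop[:start + k] for k in range(len(chop) - start + 1)]
--     columns = [[p + add1 + add2 for p in prefixes]]
--     if add1 != "":
--         columns.append([add1 + add2 + p for p in prefixes])
--     if add2 != "":
--         columns.append([p + add2 + add1 for p in prefixes])
--         columns.append([add2 + add1 + p for p in prefixes])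
--     return [s for row in zip(*columns) for s in row]
-- ===== Notes on version B (the rewrite author's own statement) =====
-- stated objective: alternative
-- what changed: Instead of A's single pass with a growing accumulator string and an inline emit block duplicated before and inside the loop, B computes each prefix independently by slicing, generates the output column-wise (one full comprehension pass per affix arrangement) and interleaves the columns with zip(*columns).
import Mathlib
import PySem

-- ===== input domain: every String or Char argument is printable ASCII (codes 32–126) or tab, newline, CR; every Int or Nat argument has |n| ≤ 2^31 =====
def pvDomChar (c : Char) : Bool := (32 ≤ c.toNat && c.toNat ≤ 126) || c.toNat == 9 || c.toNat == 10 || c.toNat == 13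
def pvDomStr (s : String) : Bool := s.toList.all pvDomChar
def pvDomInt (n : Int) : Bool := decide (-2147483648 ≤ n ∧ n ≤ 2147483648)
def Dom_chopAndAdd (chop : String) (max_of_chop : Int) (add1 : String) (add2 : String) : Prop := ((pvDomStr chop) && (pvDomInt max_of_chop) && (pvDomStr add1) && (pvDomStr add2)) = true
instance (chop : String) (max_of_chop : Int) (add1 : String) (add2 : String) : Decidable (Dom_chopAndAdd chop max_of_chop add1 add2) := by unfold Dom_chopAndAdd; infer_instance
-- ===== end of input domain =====

-- B replaces A's single accumulator pass (growing result string, emit block duplicated before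
-- and inside the loop) by independent slicing of each prefix, column-wise generation and a
-- zip(*columns) interleave (objective: alternative).

-- ===== PORT A =====
-- the for-loop of A: state = (result, mylist); the duplicated emit block is written out literally
def chopAndAddLoop (add1 add2 : String) : List Char → String → List String → List String
  | [], _, mylist => mylist
  | c :: cs, result, mylist =>
      let result' := result.push c
      let mylist' := mylist ++ [result' ++ add1 ++ add2]
        ++ (if add1 ≠ "" then [add1 ++ add2 ++ result'] else [])
        ++ (if add2 ≠ "" then [result' ++ add2 ++ add1, add2 ++ add1 ++ result'] else [])
      chopAndAddLoop add1 add2 cs result' mylist'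

def chopAndAdd (chop : String) (max_of_chop : Int) (add1 : String) (add2 : String) : List String :=
  let chopped := String.ofList (PySem.List.slice chop.toList (some 0) (some max_of_chop))
  let result := chopped
  let mylist := [result ++ add1 ++ add2]
    ++ (if add1 ≠ "" then [add1 ++ add2 ++ result] else [])
    ++ (if add2 ≠ "" then [result ++ add2 ++ add1, add2 ++ add1 ++ result] else [])
  chopAndAddLoop add1 add2 (PySem.List.slice chop.toList (some max_of_chop) none) result mylist

-- ===== PORT B =====
-- zip(*(c0 :: rest)): stop as soon as any column is exhausted, else take one head from each
def pyZipStar (c0 : List String) (rest : List (List String)) : List (List String) :=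
  match c0 with
  | [] => []
  | x :: xs =>
      if rest.all (fun c => c ≠ []) then
        (x :: rest.map (fun c => c.headD "")) :: pyZipStar xs (rest.map List.tail)
      else []

def chopAndAdd_alt (chop : String) (max_of_chop : Int) (add1 : String) (add2 : String) : List String :=
  let start : Nat := (PySem.List.slice chop.toList none (some max_of_chop)).length
  let prefixes : List String := (List.range (chop.toList.length - start + 1)).map
      (fun k => String.ofList (PySem.List.slice chop.toList none (some ((start + k : Nat) : Int))))
  let col0 := prefixes.map (fun p => p ++ add1 ++ add2)
  let rest := (if add1 ≠ "" then [prefixes.map (fun p => add1 ++ add2 ++ p)] else [])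
      ++ (if add2 ≠ "" then [prefixes.map (fun p => p ++ add2 ++ add1),
                             prefixes.map (fun p => add2 ++ add1 ++ p)] else [])
  (pyZipStar col0 rest).flatten

-- ===== PRECONDITION & SPEC =====
def Spec_chopAndAdd (chop : String) (max_of_chop : Int) (add1 : String) (add2 : String) (out : List String) : Prop := out = chopAndAdd_alt chop max_of_chop add1 add2
instance (chop : String) (max_of_chop : Int) (add1 : String) (add2 : String) (out : List String) : Decidable (Spec_chopAndAdd chop max_of_chop add1 add2 out) := by unfold Spec_chopAndAdd; infer_instance

-- ===== CLAIM (what is proved, stated in full; the proofs are below) =====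
def Claim_equal_chopAndAdd : Prop := ∀ (chop : String) (max_of_chop : Int) (add1 : String) (add2 : String), Dom_chopAndAdd chop max_of_chop add1 add2 → Spec_chopAndAdd chop max_of_chop add1 add2 (chopAndAdd chop max_of_chop add1 add2)

-- ===== LEMMAS AND PROOFS =====

-- the common emit block for one prefix
def pvBlock (add1 add2 p : String) : List String :=
  [p ++ add1 ++ add2]
    ++ (if add1 ≠ "" then [add1 ++ add2 ++ p] else [])
    ++ (if add2 ≠ "" then [p ++ add2 ++ add1, add2 ++ add1 ++ p] else [])

-- chop[:m] is a prefix of chop and chop[m:] the matching suffix, cut at s = len(chop[:m])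
theorem slice_split (l : List Char) (m : Int) :
    PySem.List.slice l none (some m) = l.take ((PySem.List.slice l none (some m)).length)
    ∧ PySem.List.slice l (some m) none = l.drop ((PySem.List.slice l none (some m)).length)
    ∧ (PySem.List.slice l none (some m)).length ≤ l.length := by
  cases m with
  | ofNat k =>
      simp only [Int.ofNat_eq_natCast, PySem.List.slice_to_natCast,
        PySem.List.slice_from_natCast, List.length_take]
      refine ⟨?_, ?_, by omega⟩
      · by_cases h : k ≤ l.length
        · rw [Nat.min_eq_left h]
        · rw [Nat.min_eq_right (by omega), List.take_of_length_le (by omega),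
            List.take_of_length_le (by omega)]
      · by_cases h : k ≤ l.length
        · rw [Nat.min_eq_left h]
        · rw [Nat.min_eq_right (by omega), List.drop_eq_nil_of_le (by omega),
            List.drop_eq_nil_of_le (by omega)]
  | negSucc k =>
      have h1 : (Int.negSucc k) = -((k+1 : Nat) : Int) := by
        rw [Int.negSucc_eq]; push_cast; ring
      rw [h1, PySem.List.slice_to_neg_natCast _ _ (by omega),
        PySem.List.slice_from_neg_natCast _ _ (by omega)]
      simp only [List.length_take]
      rw [Nat.min_eq_left (by omega)]
      exact ⟨rfl, rfl, by omega⟩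

-- accumulator form of the prefix family, matching A's loop state
def prefixAcc : String → List Char → List String
  | r, [] => [r]
  | r, c :: cs => r :: prefixAcc (r.push c) cs

-- A's loop appends, per remaining character, exactly the emit blocks of the later prefixes
theorem loop_eq (add1 add2 : String) (cs : List Char) :
    ∀ (r : String) (acc : List String),
      chopAndAddLoop add1 add2 cs r acc
        = acc ++ ((prefixAcc r cs).tail).flatMap (pvBlock add1 add2) := by
  induction cs with
  | nil => intro r acc; simp [chopAndAddLoop, prefixAcc]
  | cons c cs ih =>
      intro r acc
      show chopAndAddLoop add1 add2 cs (r.push c) _ = _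
      rw [ih]
      have htail : (prefixAcc r (c :: cs)).tail = prefixAcc (r.push c) cs := rfl
      have hhead : prefixAcc (r.push c) cs = (r.push c) :: (prefixAcc (r.push c) cs).tail := by
        cases cs <;> rfl
      rw [htail, hhead, List.flatMap_cons]
      simp [pvBlock]

-- A's whole run is the flat family of emit blocks over the accumulated prefixes
theorem loop_full (add1 add2 : String) (cs : List Char) (r : String) :
    chopAndAddLoop add1 add2 cs r (pvBlock add1 add2 r)
      = (prefixAcc r cs).flatMap (pvBlock add1 add2) := by
  rw [loop_eq]
  have hhead : prefixAcc r cs = r :: (prefixAcc r cs).tail := by cases cs <;> rfl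
  conv_rhs => rw [hhead]
  simp

theorem push_ofList (xs : List Char) (c : Char) :
    (String.ofList xs).push c = String.ofList (xs ++ [c]) := by
  have h : ((String.ofList xs).push c).toList = xs ++ [c] := by
    rw [String.toList_push, String.toList_ofList]
  calc (String.ofList xs).push c
      = String.ofList (((String.ofList xs).push c).toList) := String.ofList_toList.symm
    _ = String.ofList (xs ++ [c]) := by rw [h]

-- the accumulated prefixes are the independently sliced ones
theorem prefixAcc_eq_map (l : List Char) :
    ∀ (d s : Nat), l.length - s = d → s ≤ l.length →
      prefixAcc (String.ofList (l.take s)) (l.drop s)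
        = (List.range (d + 1)).map (fun k => String.ofList (l.take (s + k))) := by
  intro d
  induction d with
  | zero =>
      intro s hd hs
      have : s = l.length := by omega
      subst this
      simp [prefixAcc, List.drop_eq_nil_of_le, List.range_succ]
  | succ d ih =>
      intro s hd hs
      have hlt : s < l.length := by omega
      rw [List.drop_eq_getElem_cons hlt]
      show String.ofList (l.take s)
          :: prefixAcc ((String.ofList (l.take s)).push l[s]) (l.drop (s+1)) = _
      rw [push_ofList, List.take_concat_get' l s hlt, ih (s+1) (by omega) (by omega)]
      conv_rhs => rw [List.range_succ_eq_map, List.map_cons, List.map_map]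
      congr 1
      apply List.map_congr_left
      intro a _
      simp only [Function.comp_apply]
      have h : s + 1 + a = s + (a + 1) := by omega
      rw [h]

-- zip-interleave lemmas, one per column configuration
theorem zip1 (ps : List String) (f0 : String → String) :
    (pyZipStar (ps.map f0) []).flatten = ps.flatMap (fun p => [f0 p]) := by
  induction ps with
  | nil => rfl
  | cons p ps ih => simp [pyZipStar, ih]

theorem zip2 (ps : List String) (f0 f1 : String → String) :
    (pyZipStar (ps.map f0) [ps.map f1]).flatten = ps.flatMap (fun p => [f0 p, f1 p]) := by
  induction ps with
  | nil => rfl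
  | cons p ps ih => simp [pyZipStar, ih]

theorem zip3 (ps : List String) (f0 f1 f2 : String → String) :
    (pyZipStar (ps.map f0) [ps.map f1, ps.map f2]).flatten
      = ps.flatMap (fun p => [f0 p, f1 p, f2 p]) := by
  induction ps with
  | nil => rfl
  | cons p ps ih => simp [pyZipStar, ih]

theorem zip4 (ps : List String) (f0 f1 f2 f3 : String → String) :
    (pyZipStar (ps.map f0) [ps.map f1, ps.map f2, ps.map f3]).flatten
      = ps.flatMap (fun p => [f0 p, f1 p, f2 p, f3 p]) := by
  induction ps with
  | nil => rfl
  | cons p ps ih => simp [pyZipStar, ih]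

-- B is the flat family of emit blocks over the sliced prefixes
theorem B_eq_flat (chop : String) (m : Int) (add1 add2 : String) :
    chopAndAdd_alt chop m add1 add2
      = ((List.range (chop.toList.length - (PySem.List.slice chop.toList none (some m)).length + 1)).map
          (fun k => String.ofList (chop.toList.take ((PySem.List.slice chop.toList none (some m)).length + k)))).flatMap
          (pvBlock add1 add2) := by
  unfold chopAndAdd_alt
  have hpref : ∀ k : Nat, PySem.List.slice chop.toList none
      (some (((PySem.List.slice chop.toList none (some m)).length + k : Nat) : Int))
      = chop.toList.take ((PySem.List.slice chop.toList none (some m)).length + k) :=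
    fun k => PySem.List.slice_to_natCast _ _
  simp only [hpref]
  split_ifs with h1 h2 h2
  · simp only [List.cons_append, List.nil_append]
    rw [zip4]
    have hb : pvBlock add1 add2 = fun p =>
        [p ++ add1 ++ add2, add1 ++ add2 ++ p, p ++ add2 ++ add1, add2 ++ add1 ++ p] := by
      funext p; simp [pvBlock, h1, h2]
    rw [hb]
  · simp only [List.append_nil]
    rw [zip2]
    have hb : pvBlock add1 add2 = fun p => [p ++ add1 ++ add2, add1 ++ add2 ++ p] := by
      funext p; simp [pvBlock, h1, h2]
    rw [hb]
  · simp only [List.nil_append]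
    rw [zip3]
    have hb : pvBlock add1 add2 = fun p =>
        [p ++ add1 ++ add2, p ++ add2 ++ add1, add2 ++ add1 ++ p] := by
      funext p; simp [pvBlock, h1, h2]
    rw [hb]
  · simp only [List.append_nil]
    rw [zip1]
    have hb : pvBlock add1 add2 = fun p => [p ++ add1 ++ add2] := by
      funext p; simp [pvBlock, h1, h2]
    rw [hb]

-- A is the same flat family
theorem A_eq_flat (chop : String) (m : Int) (add1 add2 : String) :
    chopAndAdd chop m add1 add2
      = ((List.range (chop.toList.length - (PySem.List.slice chop.toList none (some m)).length + 1)).map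
          (fun k => String.ofList (chop.toList.take ((PySem.List.slice chop.toList none (some m)).length + k)))).flatMap
          (pvBlock add1 add2) := by
  unfold chopAndAdd
  rw [PySem.List.slice_zero_start]
  obtain ⟨hpre, hsuf, hle⟩ := slice_split chop.toList m
  set s := (PySem.List.slice chop.toList none (some m)).length with hs
  rw [hsuf, hpre]
  show chopAndAddLoop add1 add2 (chop.toList.drop s)
      (String.ofList (chop.toList.take s))
      (pvBlock add1 add2 (String.ofList (chop.toList.take s))) = _
  rw [loop_full, prefixAcc_eq_map chop.toList (chop.toList.length - s) s rfl hle]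

-- ===== VERDICT (by name: the statement is the Claim_ definition above) =====
theorem chopAndAdd_spec : Claim_equal_chopAndAdd := by
  intro chop m add1 add2 _
  unfold Spec_chopAndAdd
  rw [A_eq_flat, B_eq_flat]
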